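-- pv_equiv track=rewrite | github.com/ChaeyeonHan/python-algorithm | programmers/동적계획법/N으로 표현.py | solution
-- ===== SOURCE A (Python) =====
-- def solution(N, number):
--     answer = 0
--     # 숫자 N을 사용해서 number 만들기(숫자는 최대 8번 사용가능하다)
--     if N == number:
--         return 1
--     # 숫자 N 1개로 만들 수 있는 수들을 담은 집합, 숫자 N 2개로 만들 수 있는 수들을 담은 집합.. 8개까지
--     s = [set() for _ in range(8)]
--     # 각 set을 N * i의 갯수로 초기화
--     # {N}, {NN}, {NNN} ..
--     # [{5}, {55}, {555}, {5555}, {55555}, {555555}, {5555555}, {55555555}]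
--     for i, x in enumerate(s, start=1):
--         x.add(int(str(N)*i))
--
--     for i in range(1, 8):
--         for j in range(i):
--             for x in s[j]:
--                 for y in s[i-j-1]:
--                     s[i].add(x+y)
--                     s[i].add(x-y)
--                     s[i].add(x*y)
--
--                     if y != 0:
--                         s[i].add(x//y)
--         if number in s[i]:
--             answer = i+1  # N 사용횟수의 최솟값을 리턴
--             break
--     else:
--         return -1
--
--     return answer
-- ===== SOURCE B (Python) =====
-- def solution(N, number):
--     # Recursive decomposition: reachable(k) is the set of values expressible
--     # with exactly k copies of N; try k = 1..8 lazily, smallest first.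
--     if number == N:
--         return 1
--
--     def reachable(k):
--         vals = {int(str(N) * k)}
--         for a in range(1, k):
--             left = reachable(a)
--             right = reachable(k - a)
--             for x in left:
--                 for y in right:
--                     vals.add(x + y)
--                     vals.add(x - y)
--                     vals.add(x * y)
--                     if y != 0:
--                         vals.add(x // y)
--         return vals
--
--     for k in range(2, 9):
--         if number in reachable(k):
--             return k
--     return -1
-- ===== Notes on version B (the rewrite author's own statement) =====
-- stated objective: simpler
-- what changed: Replaces A's eagerly built 8-slot array of sets (initialized by an enumerate pass and filled level by level with index arithmetic s[i-j-1] and a for/else break) with a lazy recursive helper reachable(k) that builds the set for exactly k copies from its splits on demand, checking k = 1..8 smallest first with an early return.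
import Mathlib
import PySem

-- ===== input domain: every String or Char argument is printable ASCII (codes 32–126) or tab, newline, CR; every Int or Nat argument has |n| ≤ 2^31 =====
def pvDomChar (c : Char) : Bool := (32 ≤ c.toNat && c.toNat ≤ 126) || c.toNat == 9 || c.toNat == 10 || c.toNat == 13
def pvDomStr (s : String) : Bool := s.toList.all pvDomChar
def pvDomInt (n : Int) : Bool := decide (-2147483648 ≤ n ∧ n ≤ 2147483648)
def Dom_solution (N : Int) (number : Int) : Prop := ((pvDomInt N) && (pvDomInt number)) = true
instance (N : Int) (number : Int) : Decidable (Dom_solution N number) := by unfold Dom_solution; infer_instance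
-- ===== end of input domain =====

-- B replaces A's eager level-by-level array of sets with a lazy recursive helper
-- reachable(k), checked smallest k first (objective: simpler; return value only).
-- Python 'set' is modelled here with Std.TreeSet Int: both programs consume their
-- sets only order-independently (building other sets, membership), so this is exact
-- (a linear PySem.Set list cannot be evaluated on the level sizes these sets reach).

-- ===== PORT A =====

-- int(str(N) * i)  (on Pre_ the parse always succeeds; getD 0 is never the value used inside Pre_ except faithfully)
def pvRepA (N : Int) (i : Nat) : Int :=
  (PySem.Int.ofChars? (List.replicate i (PySem.Int.toChars N)).flatten).getD 0

-- the four 'add' statements of A's innermost loop body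
def pvGenA (acc : Std.TreeSet Int) (x y : Int) : Std.TreeSet Int :=
  let acc := Std.TreeSet.insert acc (x + y)
  let acc := Std.TreeSet.insert acc (x - y)
  let acc := Std.TreeSet.insert acc (x * y)
  if y ≠ 0 then Std.TreeSet.insert acc (PySem.Int.floordiv x y) else acc

-- 'for x in s1: for y in s2: …' adding into acc
def pvCombineA (s1 s2 : Std.TreeSet Int) (acc : Std.TreeSet Int) : Std.TreeSet Int :=
  s1.foldl (fun acc x => s2.foldl (fun acc y => pvGenA acc x y) acc) acc

-- the body of one outer iteration: everything added into s[i]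
def pvStepA (s : List (Std.TreeSet Int)) (i : Nat) : Std.TreeSet Int :=
  (List.range i).foldl
    (fun acc j => pvCombineA (s.getD j Std.TreeSet.empty) (s.getD (i - j - 1) Std.TreeSet.empty) acc)
    (s.getD i Std.TreeSet.empty)

-- 'for i in range(1,8): … if number in s[i]: answer = i+1; break / else: return -1'
def pvLoopA (number : Int) : List Nat → List (Std.TreeSet Int) → Int
  | [], _ => -1
  | i :: rest, s =>
      let s' := s.set i (pvStepA s i)
      if Std.TreeSet.contains (s'.getD i Std.TreeSet.empty) number then (i : Int) + 1
      else pvLoopA number rest s'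

def solution (N : Int) (number : Int) : Int :=
  if N = number then 1
  else
    let s := (List.range 8).map (fun _ => (Std.TreeSet.empty : Std.TreeSet Int))
    let s := (PySem.List.enumerate s 1).map (fun p => Std.TreeSet.insert p.2 (pvRepA N p.1.toNat))
    pvLoopA number (List.range' 1 7) s

-- ===== PORT B =====

-- int(str(N) * k)
def pvRepB (N : Int) (k : Nat) : Int :=
  (PySem.Int.ofChars? (List.replicate k (PySem.Int.toChars N)).flatten).getD 0

def pvGenB (acc : Std.TreeSet Int) (x y : Int) : Std.TreeSet Int :=
  let acc := Std.TreeSet.insert acc (x + y)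
  let acc := Std.TreeSet.insert acc (x - y)
  let acc := Std.TreeSet.insert acc (x * y)
  if y ≠ 0 then Std.TreeSet.insert acc (PySem.Int.floordiv x y) else acc

def pvCombineB (left right : Std.TreeSet Int) (vals : Std.TreeSet Int) : Std.TreeSet Int :=
  left.foldl (fun vals x => right.foldl (fun vals y => pvGenB vals x y) vals) vals

-- reachable(k): values expressible with exactly k copies of N
def pvReachB (N : Int) (k : Nat) : Std.TreeSet Int :=
  let base := Std.TreeSet.insert Std.TreeSet.empty (pvRepB N k)
  (List.range (k - 1)).attach.foldl
    (fun vals a =>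
      pvCombineB (pvReachB N (a.1 + 1)) (pvReachB N (k - (a.1 + 1))) vals)
    base
  termination_by k
  decreasing_by
    · have := a.2; simp [List.mem_range] at this; omega
    · have := a.2; simp [List.mem_range] at this; omega

def pvLoopB (N number : Int) : List Nat → Int
  | [] => -1
  | k :: rest =>
      if Std.TreeSet.contains (pvReachB N k) number then (k : Int)
      else pvLoopB N number rest

def solution_alt (N : Int) (number : Int) : Int :=
  if number = N then 1
  else pvLoopB N number (List.range' 2 7)

-- ===== PRECONDITION & SPEC =====
-- Pre_ excludes N < 0 with N ≠ number: there A raises ValueError at int(str(N)*2) ('-5-5'), so A returns on exactly this set.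
def Pre_solution (N : Int) (number : Int) : Prop := N = number ∨ 0 ≤ N
instance (N : Int) (number : Int) : Decidable (Pre_solution N number) := by unfold Pre_solution; infer_instance
def pvWitness_solution : Int × Int := (5, 12)

def Spec_solution (N : Int) (number : Int) (out : Int) : Prop := out = solution_alt N number
instance (N : Int) (number : Int) (out : Int) : Decidable (Spec_solution N number out) := by unfold Spec_solution; infer_instance

-- ===== CLAIM (what is proved, stated in full; the proofs are below) =====
def Claim_equal_solution : Prop := ∀ (N : Int) (number : Int), Dom_solution N number → Pre_solution N number → Spec_solution N number (solution N number)

-- ===== LEMMAS AND PROOFS =====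

theorem pvCombine_eq : pvCombineA = pvCombineB := rfl
theorem pvRep_eq : pvRepA = pvRepB := rfl

theorem foldl_attach_range {β : Type} (n : Nat) (f : β → Nat → β) (init : β) :
    (List.range n).attach.foldl (fun acc a => f acc a.1) init
      = (List.range n).foldl f init := by
  rw [← List.foldl_map (f := fun (a : {x // x ∈ List.range n}) => a.1) (g := f)]
  simp

-- the invariant on A's array after levels < m have been filled
def pvInv (N : Int) (s : List (Std.TreeSet Int)) (m : Nat) : Prop :=
  s.length = 8 ∧ ∀ j, j < 8 → s.getD j Std.TreeSet.empty = if j + 1 ≤ m then pvReachB N (j + 1) else Std.TreeSet.insert Std.TreeSet.empty (pvRepA N (j + 1))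

theorem reach_one (N : Int) : pvReachB N 1 = Std.TreeSet.insert Std.TreeSet.empty (pvRepB N 1) := by
  rw [pvReachB]
  simp

theorem step_eq (N : Int) (s : List (Std.TreeSet Int)) (m : Nat) (hm : 1 ≤ m) (hm8 : m < 8)
    (hinv : pvInv N s m) : pvStepA s m = pvReachB N (m + 1) := by
  obtain ⟨hlen, hj⟩ := hinv
  rw [pvReachB]
  rw [show m + 1 - 1 = m from rfl]
  rw [foldl_attach_range m
    (f := fun vals a => pvCombineB (pvReachB N (a + 1)) (pvReachB N (m + 1 - (a + 1))) vals)]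
  unfold pvStepA
  have hbase : s.getD m Std.TreeSet.empty = Std.TreeSet.insert Std.TreeSet.empty (pvRepB N (m + 1)) := by
    rw [hj m hm8, if_neg (by omega), pvRep_eq]
  rw [hbase]
  apply PySem.List.foldl_congr_mem
  intro acc j hjmem
  rw [List.mem_range] at hjmem
  rw [pvCombine_eq.symm]
  congr 1
  · rw [hj j (by omega)]
    simp [Nat.succ_le_of_lt hjmem]
  · rw [hj (m - j - 1) (by omega)]
    have h1 : m - j - 1 + 1 = m - j := by omega
    have h2 : m + 1 - (j + 1) = m - j := by omega
    simp [h1, h2]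

theorem inv_step (N : Int) (s : List (Std.TreeSet Int)) (m : Nat) (hm : 1 ≤ m) (hm8 : m < 8)
    (hinv : pvInv N s m) : pvInv N (s.set m (pvStepA s m)) (m + 1) := by
  obtain ⟨hlen, hj⟩ := hinv
  refine ⟨by simp [hlen], ?_⟩
  intro j hj8
  rcases eq_or_ne j m with rfl | hne
  · rw [List.getD_eq_getElem?_getD]
    rw [List.getElem?_set_self (by omega)]
    simp [step_eq N s j hm hm8 ⟨hlen, hj⟩]
  · rw [List.getD_eq_getElem?_getD, List.getElem?_set_ne (by omega), ← List.getD_eq_getElem?_getD]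
    rw [hj j hj8]
    by_cases h : j + 1 ≤ m
    · rw [if_pos h, if_pos (by omega)]
    · rw [if_neg h, if_neg (by omega)]

theorem loop_eq (N number : Int) : ∀ (c : Nat) (m : Nat), m = 8 - c → 1 ≤ m → m ≤ 8 →
    ∀ s, pvInv N s m →
    pvLoopA number (List.range' m (8 - m)) s = pvLoopB N number (List.range' (m + 1) (8 - m)) := by
  intro c
  induction c with
  | zero =>
      intro m hm _ _ s _
      have : m = 8 := by omega
      subst this
      simp [pvLoopA, pvLoopB]
  | succ k ih =>
      intro m hm hm1 hm8 s hinv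
      rcases eq_or_ne m 8 with rfl | hne
      · simp [pvLoopA, pvLoopB]
      have hlt : m < 8 := by omega
      have hrange : 8 - m = (8 - (m + 1)) + 1 := by omega
      rw [hrange, List.range'_succ, List.range'_succ]
      simp only [pvLoopA, pvLoopB]
      have hset := inv_step N s m hm1 hlt hinv
      have hget : (s.set m (pvStepA s m)).getD m Std.TreeSet.empty = pvReachB N (m + 1) := by
        have := hset.2 m hlt
        simpa using this
      rw [hget]
      split_ifs with hmem
      · push_cast
        ring
      · exact ih (m + 1) (by omega) (by omega) (by omega) _ hset

theorem inv_init (N : Int) :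
    pvInv N ((PySem.List.enumerate ((List.range 8).map (fun _ => (Std.TreeSet.empty : Std.TreeSet Int))) 1).map
      (fun p => Std.TreeSet.insert p.2 (pvRepA N p.1.toNat))) 1 := by
  constructor
  · simp
  · intro j hj8
    interval_cases j <;>
      simp [List.range_succ, PySem.List.enumerate, reach_one, pvRep_eq]

theorem solution_spec' (N number : Int) (h : Pre_solution N number) :
    solution N number = solution_alt N number := by
  unfold solution solution_alt
  rcases eq_or_ne N number with rfl | hne
  · simp
  · have hne' : number ≠ N := Ne.symm hne
    rw [if_neg hne, if_neg hne']
    have h := loop_eq N number 7 1 (by norm_num) (by norm_num) (by norm_num) _ (inv_init N)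
    norm_num at h
    simpa using h

-- ===== VERDICT (by name: the statement is the Claim_ definition above) =====
theorem solution_spec : Claim_equal_solution := by
  intro N number _ hpre
  unfold Spec_solution
  exact solution_spec' N number hpre
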